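-- pv_equiv track=rewrite | github.com/UtkarshDubeyGIT/Fuzzy-Monotonic-LightGBM-for-Explainable-Credit-Default-Prediction | src/models/run_ablation.py | prioritized_keys
-- ===== SOURCE A (Python) =====
-- from typing import Dict, List, Optional
--
-- def prioritized_keys(dicts: List[Dict]) -> List[str]:
--     keys = set()
--     for d in dicts:
--         keys.update(d.keys())
--     keys.discard("variant")
--     priority = [
--         # prioritize requested metrics
--         "roc_auc",
--         "pr_auc",
--         "brier",
--         "ks",
--         # sensible fallbacks
--         "auc",
--         "accuracy",
--         "f1",
--         "f1_score",
--         "precision",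
--         "recall",
--         "logloss",
--         "loss",
--     ]
--     ordered = [k for k in priority if k in keys]
--     remaining = sorted(k for k in keys if k not in priority)
--     return ["variant"] + ordered + remaining
-- ===== SOURCE B (Python) =====
-- from typing import Dict, List
--
-- _PRIORITY = [
--     "roc_auc", "pr_auc", "brier", "ks",
--     "auc", "accuracy", "f1", "f1_score",
--     "precision", "recall", "logloss", "loss",
-- ]
-- _RANK = {k: i for i, k in enumerate(_PRIORITY)}
--
--
-- def prioritized_keys(dicts: List[Dict]) -> List[str]:
--     keys = {k for d in dicts for k in d if k != "variant"}
--     body = sorted(keys, key=lambda k: (_RANK.get(k, len(_PRIORITY)), k))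
--     return ["variant"] + body
-- ===== Notes on version B (the rewrite author's own statement) =====
-- stated objective: alternative
-- what changed: A partitions the keys into a priority-filtered list plus a separately sorted remainder and concatenates; B precomputes a rank table and produces the whole body with one composite-key sort sorted(keys, key=(rank.get(k, len(priority)), k)).
import Mathlib
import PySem

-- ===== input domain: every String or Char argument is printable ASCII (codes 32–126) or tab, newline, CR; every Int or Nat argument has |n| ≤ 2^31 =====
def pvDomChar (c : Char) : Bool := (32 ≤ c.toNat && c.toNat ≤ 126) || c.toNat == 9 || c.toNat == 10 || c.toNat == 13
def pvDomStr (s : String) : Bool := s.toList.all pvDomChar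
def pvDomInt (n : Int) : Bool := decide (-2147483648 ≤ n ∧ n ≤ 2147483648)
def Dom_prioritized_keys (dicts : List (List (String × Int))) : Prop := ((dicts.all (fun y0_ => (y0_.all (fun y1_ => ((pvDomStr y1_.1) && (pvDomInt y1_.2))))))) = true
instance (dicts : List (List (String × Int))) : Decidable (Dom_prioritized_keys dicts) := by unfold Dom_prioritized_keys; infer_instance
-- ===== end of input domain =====

-- B replaces A's two-list decomposition (priority filter + separately sorted remainder) by ONE
-- composite-key sort over a precomputed rank table; objective: alternative decomposition, not speed.

-- ===== PORT A =====
-- Each dict argument is an association list; its Python d.keys() is the list of first components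
-- (duplicates, impossible in a real dict, are absorbed by the enclosing set in both ports).
def prioritized_keys (dicts : List (List (String × Int))) : List String :=
  let keys : PySem.Set String :=
    dicts.foldl (fun s d => PySem.Set.update s (d.map (fun p => p.1))) PySem.Set.empty
  let keys := PySem.Set.discard keys "variant"
  let priority : List String :=
    ["roc_auc", "pr_auc", "brier", "ks",
     "auc", "accuracy", "f1", "f1_score",
     "precision", "recall", "logloss", "loss"]
  let ordered := priority.filter (fun k => PySem.Set.contains keys k)
  let remaining := PySem.List.sorted (keys.filter (fun k => !(priority.contains k))) (fun x => x) false
  ["variant"] ++ ordered ++ remaining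

-- ===== PORT B =====
def pvPriorityAlt : List String :=
  ["roc_auc", "pr_auc", "brier", "ks",
   "auc", "accuracy", "f1", "f1_score",
   "precision", "recall", "logloss", "loss"]

-- _RANK = {k: i for i, k in enumerate(_PRIORITY)}
def pvRankAlt : PySem.Dict String Int :=
  (PySem.List.enumerate pvPriorityAlt 0).foldl
    (fun d p => PySem.Dict.insert d p.2 p.1) PySem.Dict.empty

def prioritized_keys_alt (dicts : List (List (String × Int))) : List String :=
  let keys : PySem.Set String :=
    dicts.foldl
      (fun s d => d.foldl (fun s p => if p.1 ≠ "variant" then PySem.Set.add s p.1 else s) s)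
      PySem.Set.empty
  let body := PySem.List.sorted2 keys
      (fun k => PySem.Dict.getD pvRankAlt k (PySem.List.len pvPriorityAlt))
      (fun k => k) false
  ["variant"] ++ body

-- ===== PRECONDITION & SPEC =====
def Spec_prioritized_keys (dicts : List (List (String × Int))) (out : List String) : Prop := out = prioritized_keys_alt dicts
instance (dicts : List (List (String × Int))) (out : List String) : Decidable (Spec_prioritized_keys dicts out) := by unfold Spec_prioritized_keys; infer_instance

-- ===== CLAIM (what is proved, stated in full; the proofs are below) =====
def Claim_equal_prioritized_keys : Prop := ∀ (dicts : List (List (String × Int))), Dom_prioritized_keys dicts → Spec_prioritized_keys dicts (prioritized_keys dicts)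

-- ===== LEMMAS AND PROOFS =====

-- B's tuple-key sort is the plain sort under the lexicographic key
lemma sorted2_eq_sorted_lex (xs : List String) (k1 : String → Int) :
    PySem.List.sorted2 xs k1 (fun k => k) false
      = PySem.List.sorted xs (fun x => (toLex (k1 x, x) : Lex (Int × String))) false := by
  show xs.foldl (fun acc x => PySem.List.insertBy
      (fun a b => decide (k1 a < k1 b) || (!decide (k1 b < k1 a) && decide (a < b))) x acc) []
    = xs.foldl (fun acc x => PySem.List.insertBy
      (fun a b => decide ((toLex (k1 a, a) : Lex (Int × String)) < toLex (k1 b, b))) x acc) []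
  have hb : (fun a b => decide (k1 a < k1 b) || (!decide (k1 b < k1 a) && decide (a < b)))
      = (fun (a b : String) => decide ((toLex (k1 a, a) : Lex (Int × String)) < toLex (k1 b, b))) := by
    funext a b
    rcases lt_trichotomy (k1 a) (k1 b) with h | h | h
    · simp [Prod.Lex.lt_iff, h, not_lt_of_gt]
    · simp [Prod.Lex.lt_iff, h]
    · simp [Prod.Lex.lt_iff, h, not_lt_of_gt h, h.ne']
  rw [hb]

-- removing "variant" after a batch of insertions = skipping "variant" while inserting
lemma discard_add (s : List String) (x v : String) :
    PySem.Set.discard (PySem.Set.add s x) v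
      = if x ≠ v then PySem.Set.add (PySem.Set.discard s v) x else PySem.Set.discard s v := by
  by_cases hxv : x = v
  · subst hxv
    by_cases hxs : x ∈ s
    · simp [hxs]
    · simp [hxs, PySem.Set.discard, List.filter_append]
  · by_cases hxs : x ∈ s
    · have hx' : x ∈ PySem.Set.discard s v := by
        simp [PySem.Set.mem_discard, hxs, hxv]
      simp [hxs, hxv, hx']
    · simp [hxs, hxv, PySem.Set.discard, List.filter_append]

lemma inner_eq (d : List (String × Int)) (s : PySem.Set String) :
    PySem.Set.discard (PySem.Set.update s (d.map (fun p => p.1))) "variant"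
      = d.foldl (fun s p => if p.1 ≠ "variant" then PySem.Set.add s p.1 else s)
          (PySem.Set.discard s "variant") := by
  induction d generalizing s with
  | nil => rfl
  | cons p d ih =>
      show PySem.Set.discard (PySem.Set.update (PySem.Set.add s p.1) (d.map (fun p => p.1))) "variant" = _
      rw [ih, discard_add]
      by_cases h : p.1 = "variant" <;> simp [h]

lemma set_eq (dicts : List (List (String × Int))) (s : PySem.Set String) :
    PySem.Set.discard (dicts.foldl (fun s d => PySem.Set.update s (d.map (fun p => p.1))) s) "variant"
      = dicts.foldl
          (fun s d => d.foldl (fun s p => if p.1 ≠ "variant" then PySem.Set.add s p.1 else s) s)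
          (PySem.Set.discard s "variant") := by
  induction dicts generalizing s with
  | nil => rfl
  | cons d dicts ih => simpa [inner_eq] using ih (PySem.Set.update s (d.map (fun p => p.1)))

lemma keysA_nodup (dicts : List (List (String × Int))) (s : PySem.Set String) (hs : s.Nodup) :
    (dicts.foldl (fun s d => PySem.Set.update s (d.map (fun p => p.1))) s).Nodup := by
  induction dicts generalizing s with
  | nil => exact hs
  | cons d dicts ih => exact ih _ (PySem.Set.nodup_update _ _ hs)

lemma priority_nodup : pvPriorityAlt.Nodup := by decide

lemma rk_pairwise :
    pvPriorityAlt.Pairwise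
      (fun a b => PySem.Dict.getD pvRankAlt a (PySem.List.len pvPriorityAlt)
                < PySem.Dict.getD pvRankAlt b (PySem.List.len pvPriorityAlt)) := by decide

lemma rk_lt_of_mem (k : String) (h : k ∈ pvPriorityAlt) :
    PySem.Dict.getD pvRankAlt k (PySem.List.len pvPriorityAlt) < 12 := by
  simp only [pvPriorityAlt, List.mem_cons, List.not_mem_nil, or_false] at h
  rcases h with rfl|rfl|rfl|rfl|rfl|rfl|rfl|rfl|rfl|rfl|rfl|rfl <;> decide

lemma rk_of_not_mem (k : String) (h : k ∉ pvPriorityAlt) :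
    PySem.Dict.getD pvRankAlt k (PySem.List.len pvPriorityAlt) = 12 := by
  have hitems : pvRankAlt.items =
      [("roc_auc", (0:Int)), ("pr_auc", 1), ("brier", 2), ("ks", 3),
       ("auc", 4), ("accuracy", 5), ("f1", 6), ("f1_score", 7),
       ("precision", 8), ("recall", 9), ("logloss", 10), ("loss", 11)] := by decide
  simp only [pvPriorityAlt, List.mem_cons, List.not_mem_nil, or_false, not_or] at h
  obtain ⟨h1, h2, h3, h4, h5, h6, h7, h8, h9, h10, h11, h12⟩ := h
  have e1 : ("roc_auc" == k) = false := beq_eq_false_iff_ne.2 (Ne.symm h1)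
  have e2 : ("pr_auc" == k) = false := beq_eq_false_iff_ne.2 (Ne.symm h2)
  have e3 : ("brier" == k) = false := beq_eq_false_iff_ne.2 (Ne.symm h3)
  have e4 : ("ks" == k) = false := beq_eq_false_iff_ne.2 (Ne.symm h4)
  have e5 : ("auc" == k) = false := beq_eq_false_iff_ne.2 (Ne.symm h5)
  have e6 : ("accuracy" == k) = false := beq_eq_false_iff_ne.2 (Ne.symm h6)
  have e7 : ("f1" == k) = false := beq_eq_false_iff_ne.2 (Ne.symm h7)
  have e8 : ("f1_score" == k) = false := beq_eq_false_iff_ne.2 (Ne.symm h8)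
  have e9 : ("precision" == k) = false := beq_eq_false_iff_ne.2 (Ne.symm h9)
  have e10 : ("recall" == k) = false := beq_eq_false_iff_ne.2 (Ne.symm h10)
  have e11 : ("logloss" == k) = false := beq_eq_false_iff_ne.2 (Ne.symm h11)
  have e12 : ("loss" == k) = false := beq_eq_false_iff_ne.2 (Ne.symm h12)
  simp [PySem.Dict.getD, PySem.Dict.get?, hitems, List.find?,
    e1, e2, e3, e4, e5, e6, e7, e8, e9, e10, e11, e12]
  decide

-- the heart of the equivalence: A's "priority filter ++ sorted remainder" IS the single
-- lexicographic (rank, name) sort B performs, for any duplicate-free key list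
lemma body_eq (keys : List String) (hnd : keys.Nodup) :
    PySem.List.sorted2 keys
        (fun k => PySem.Dict.getD pvRankAlt k (PySem.List.len pvPriorityAlt)) (fun k => k) false
      = pvPriorityAlt.filter (fun k => PySem.Set.contains keys k)
        ++ PySem.List.sorted (keys.filter (fun k => !(pvPriorityAlt.contains k))) (fun x => x) false := by
  rw [sorted2_eq_sorted_lex]
  apply PySem.List.sorted_eq_of_perm_of_pairwise_lt
  · -- permutation
    have hord : (pvPriorityAlt.filter (fun k => PySem.Set.contains keys k)).Perm
        (keys.filter (fun k => pvPriorityAlt.contains k)) := by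
      rw [List.perm_ext_iff_of_nodup (priority_nodup.filter _) (hnd.filter _)]
      intro a
      simp [List.mem_filter, PySem.Set.contains, and_comm]
    have hrem := PySem.List.sorted_perm (keys.filter (fun k => !(pvPriorityAlt.contains k)))
        (fun x => x) false
    exact (hord.append hrem).trans
      (List.filter_append_perm (fun k => pvPriorityAlt.contains k) keys)
  · -- strict pairwise order under the lexicographic key
    rw [List.pairwise_append]
    refine ⟨?_, ?_, ?_⟩
    · exact (rk_pairwise.filter _).imp (fun h => Prod.Lex.lt_iff.2 (Or.inl h))
    · have hp := PySem.List.sorted_pairwise (keys.filter (fun k => !(pvPriorityAlt.contains k)))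
        (fun x => x)
      have hnd' : (PySem.List.sorted (keys.filter (fun k => !(pvPriorityAlt.contains k)))
          (fun x => x) false).Nodup :=
        (PySem.List.sorted_perm _ _ _).nodup_iff.2 (hnd.filter _)
      refine (hp.and hnd').imp_of_mem ?_
      intro a b ha hb hab
      have hma : a ∉ pvPriorityAlt := by
        have := (List.mem_filter.1 ((PySem.List.mem_sorted _ _ _ a).1 ha)).2
        simpa using this
      have hmb : b ∉ pvPriorityAlt := by
        have := (List.mem_filter.1 ((PySem.List.mem_sorted _ _ _ b).1 hb)).2
        simpa using this
      refine Prod.Lex.lt_iff.2 (Or.inr ?_)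
      refine ⟨by rw [rk_of_not_mem a hma, rk_of_not_mem b hmb]; rfl, ?_⟩
      exact lt_of_le_of_ne hab.1 hab.2
    · intro a ha b hb
      have hma : a ∈ pvPriorityAlt := (List.mem_filter.1 ha).1
      have hmb : b ∉ pvPriorityAlt := by
        have := (List.mem_filter.1 ((PySem.List.mem_sorted _ _ _ b).1 hb)).2
        simpa using this
      refine Prod.Lex.lt_iff.2 (Or.inl ?_)
      rw [rk_of_not_mem b hmb]
      exact rk_lt_of_mem a hma

-- ===== VERDICT (by name: the statement is the Claim_ definition above) =====
theorem prioritized_keys_spec : Claim_equal_prioritized_keys := by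
  intro dicts _
  unfold Spec_prioritized_keys prioritized_keys prioritized_keys_alt
  have hk := set_eq dicts PySem.Set.empty
  rw [show PySem.Set.discard PySem.Set.empty "variant" = PySem.Set.empty from rfl] at hk
  have hnd : (dicts.foldl
      (fun s d => d.foldl (fun s p => if p.1 ≠ "variant" then PySem.Set.add s p.1 else s) s)
      PySem.Set.empty).Nodup := by
    rw [← hk]
    exact PySem.Set.nodup_discard _ _ (keysA_nodup dicts PySem.Set.empty List.nodup_nil)
  show ["variant"]
      ++ (["roc_auc", "pr_auc", "brier", "ks",
           "auc", "accuracy", "f1", "f1_score",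
           "precision", "recall", "logloss", "loss"] : List String).filter
            (fun k => PySem.Set.contains ((dicts.foldl
              (fun s d => PySem.Set.update s (d.map (fun p => p.1))) PySem.Set.empty).discard "variant") k)
      ++ PySem.List.sorted (((dicts.foldl
              (fun s d => PySem.Set.update s (d.map (fun p => p.1))) PySem.Set.empty).discard "variant").filter
            (fun k => !(["roc_auc", "pr_auc", "brier", "ks",
           "auc", "accuracy", "f1", "f1_score",
           "precision", "recall", "logloss", "loss"] : List String).contains k)) (fun x => x) false
    = ["variant"] ++ PySem.List.sorted2 (dicts.foldl
        (fun s d => d.foldl (fun s p => if p.1 ≠ "variant" then PySem.Set.add s p.1 else s) s)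
        PySem.Set.empty)
        (fun k => PySem.Dict.getD pvRankAlt k (PySem.List.len pvPriorityAlt)) (fun k => k) false
  rw [body_eq _ hnd, ← hk,
    show pvPriorityAlt =
      ["roc_auc", "pr_auc", "brier", "ks",
       "auc", "accuracy", "f1", "f1_score",
       "precision", "recall", "logloss", "loss"] from rfl]
  rw [List.append_assoc]
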